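-- pv_equiv track=rewrite | github.com/tru/presentations | eurollvm26/release-update/scripts/gen_subproject_charts.py | top_n_combined
-- ===== SOURCE A (Python) =====
-- import collections
--
-- def top_n_combined(by_release: dict, n: int,
--                    exclude: list[str] | None = None) -> list[str]:
--     combined: collections.Counter = collections.Counter()
--     for ctr in by_release.values():
--         combined.update(ctr)
--     for key in (exclude or []):
--         combined.pop(key, None)
--     return [k for k, _ in combined.most_common(n)]
-- ===== SOURCE B (Python) =====
-- def top_n_combined(by_release: dict, n: int,
--                    exclude: list[str] | None = None) -> list[str]:
--     totals: dict = {}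
--     for ctr in by_release.values():
--         for k, v in ctr.items():
--             totals[k] = totals.get(k, 0) + v
--     for k in (exclude or []):
--         totals.pop(k, None)
--     # bucket keys by their total, then emit buckets from the highest total down,
--     # stopping as soon as n names have been collected
--     buckets: dict = {}
--     for k, v in totals.items():
--         buckets.setdefault(v, []).append(k)
--     result: list[str] = []
--     for c in sorted(buckets, reverse=True):
--         if len(result) >= n:
--             break
--         result.extend(buckets[c])
--     return result[:n]
-- ===== Notes on version B (the rewrite author's own statement) =====
-- stated objective: alternative
-- what changed: B replaces Counter + most_common(n)'s comparison sort/heap selection over all (key, count) pairs by bucketing keys by their summed total into a dict, sorting only the distinct totals descending, and emitting buckets from the highest total down with an early stop once n names are collected.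
import Mathlib
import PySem

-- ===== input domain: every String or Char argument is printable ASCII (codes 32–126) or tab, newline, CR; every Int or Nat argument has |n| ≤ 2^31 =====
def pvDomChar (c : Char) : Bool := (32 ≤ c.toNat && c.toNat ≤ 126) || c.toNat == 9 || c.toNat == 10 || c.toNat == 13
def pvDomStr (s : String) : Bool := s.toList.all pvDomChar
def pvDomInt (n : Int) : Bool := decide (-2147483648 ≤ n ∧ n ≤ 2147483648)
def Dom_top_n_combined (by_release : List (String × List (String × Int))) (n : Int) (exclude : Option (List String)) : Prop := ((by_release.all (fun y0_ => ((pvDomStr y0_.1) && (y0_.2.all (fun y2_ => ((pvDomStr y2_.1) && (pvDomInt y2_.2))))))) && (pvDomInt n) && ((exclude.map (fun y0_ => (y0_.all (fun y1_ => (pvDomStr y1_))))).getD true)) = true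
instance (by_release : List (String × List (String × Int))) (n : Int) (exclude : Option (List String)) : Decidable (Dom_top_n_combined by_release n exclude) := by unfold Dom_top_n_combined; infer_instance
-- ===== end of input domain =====

-- B replaces most_common(n)'s comparison sort of all (key, count) pairs by bucketing keys by
-- their total and emitting buckets from the highest total down with an early stop (objective:
-- alternative — it sorts only the distinct totals instead of all pairs).

-- ===== PORT A =====
def top_n_combined (by_release : List (String × List (String × Int))) (n : Int) (exclude : Option (List String)) : List String :=
  -- combined = Counter(); for ctr in by_release.values(): combined.update(ctr)
  let combined : PySem.Dict String Int :=
    ((PySem.Dict.ofList by_release).values).foldl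
      (fun d ctr => ((PySem.Dict.ofList ctr).items).foldl
        (fun d p => d.modify p.1 0 (· + p.2)) d)
      PySem.Dict.empty
  -- for key in (exclude or []): combined.pop(key, None)
  let combined := (exclude.getD []).foldl (fun d k => d.erase k) combined
  -- [k for k, _ in combined.most_common(n)]  (most_common(n) = stable sort by count descending, first n; n ≤ 0 gives [])
  ((PySem.List.sorted combined.items (fun p => p.2) true).take n.toNat).map (·.1)

-- ===== PORT B =====
-- 'for c in sorted(buckets, reverse=True): if len(result) >= n: break; result.extend(buckets[c])'
def pvEmit (buckets : PySem.Dict Int (List String)) (n : Int) : List Int → List String → List String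
  | [], acc => acc
  | c :: cs, acc => if n ≤ (acc.length : Int) then acc else pvEmit buckets n cs (acc ++ buckets.getD c [])

def top_n_combined_alt (by_release : List (String × List (String × Int))) (n : Int) (exclude : Option (List String)) : List String :=
  -- totals[k] = totals.get(k, 0) + v   (nested loop over the per-release counters)
  let totals : PySem.Dict String Int :=
    ((PySem.Dict.ofList by_release).values).foldl
      (fun d ctr => ((PySem.Dict.ofList ctr).items).foldl
        (fun d p => d.insert p.1 (d.getD p.1 0 + p.2)) d)
      PySem.Dict.empty
  -- for k in (exclude or []): totals.pop(k, None)
  let totals := (exclude.getD []).foldl (fun d k => d.erase k) totals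
  -- buckets.setdefault(v, []).append(k)  — in-place append to the defaulted list
  let buckets : PySem.Dict Int (List String) :=
    totals.items.foldl (fun b p => b.modify p.2 [] (· ++ [p.1])) PySem.Dict.empty
  let result := pvEmit buckets n (PySem.List.sorted buckets.keys (fun c => c) true) []
  -- return result[:n]
  PySem.List.slice result none (some n)

-- ===== PRECONDITION & SPEC =====
def Spec_top_n_combined (by_release : List (String × List (String × Int))) (n : Int) (exclude : Option (List String)) (out : List String) : Prop := out = top_n_combined_alt by_release n exclude
instance (by_release : List (String × List (String × Int))) (n : Int) (exclude : Option (List String)) (out : List String) : Decidable (Spec_top_n_combined by_release n exclude out) := by unfold Spec_top_n_combined; infer_instance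

-- ===== CLAIM (what is proved, stated in full; the proofs are below) =====
def Claim_equal_top_n_combined : Prop := ∀ (by_release : List (String × List (String × Int))) (n : Int) (exclude : Option (List String)), Dom_top_n_combined by_release n exclude → Spec_top_n_combined by_release n exclude (top_n_combined by_release n exclude)

-- ===== LEMMAS AND PROOFS =====

-- insertBy puts x in front when it goes before every element
theorem insertBy_front {α : Type} (bef : α → α → Bool) (x : α) (m : List α)
    (h : ∀ y ∈ m, bef x y = true) : PySem.List.insertBy bef x m = x :: m := by
  cases m with
  | nil => rfl
  | cons y ys => simp [PySem.List.insertBy, h y (by simp)]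

-- insertBy skips a leading block x goes after
theorem insertBy_append_left {α : Type} (bef : α → α → Bool) (x : α) (l m : List α)
    (h : ∀ y ∈ l, bef x y = false) :
    PySem.List.insertBy bef x (l ++ m) = l ++ PySem.List.insertBy bef x m := by
  induction l with
  | nil => rfl
  | cons y l ih =>
    simp only [List.cons_append]
    rw [PySem.List.insertBy]
    simp only [h y (by simp)]
    simp only [Bool.false_eq_true, if_false, List.cons.injEq, true_and]
    exact ih (fun z hz => h z (by simp [hz]))

-- inserting an element whose count already has a (strictly descending) block: it lands at the
-- end of its own block
theorem ins_blocks_mem (K : List Int) (g : Int → List (String × Int)) (x : String × Int)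
    (hK : K.Pairwise (fun a b => b < a)) (hg : ∀ c ∈ K, ∀ p ∈ g c, p.2 = c) (hmem : x.2 ∈ K) :
    PySem.List.insertBy (fun a b => decide (b.2 < a.2)) x (K.flatMap g)
      = K.flatMap (fun c => if c = x.2 then g c ++ [x] else g c) := by
  induction K with
  | nil => simp at hmem
  | cons c K ih =>
    have hlt : ∀ b ∈ K, b < c := (List.pairwise_cons.mp hK).1
    have hKt : K.Pairwise (fun a b => b < a) := (List.pairwise_cons.mp hK).2
    simp only [List.flatMap_cons]
    by_cases hc : c = x.2
    · rw [insertBy_append_left _ _ _ _ (fun y hy => by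
        have h1 := hg c (by simp) y hy
        simp only [h1, hc]
        simp)]
      rw [insertBy_front _ _ _ (fun y hy => by
        obtain ⟨c', hc', hy'⟩ := List.mem_flatMap.mp hy
        have h1 := hg c' (by simp [hc']) y hy'
        have h2 := hlt c' hc'
        simp only [decide_eq_true_eq, h1]
        omega)]
      rw [if_pos hc]
      have hcg : List.flatMap (fun c' => if c' = x.2 then g c' ++ [x] else g c') K
          = List.flatMap g K := by
        apply List.flatMap_congr
        intro c' hc'
        have := hlt c' hc'
        rw [if_neg (by omega)]
      rw [hcg]
      simp
    · have hmem' : x.2 ∈ K := by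
        rcases List.mem_cons.mp hmem with h | h
        · exact absurd h.symm hc
        · exact h
      have hx2 : x.2 < c := hlt _ hmem'
      rw [insertBy_append_left _ _ _ _ (fun y hy => by
        have h1 := hg c (by simp) y hy
        simp only [decide_eq_false_iff_not, h1]
        omega)]
      rw [ih hKt (fun c' hc' => hg c' (by simp [hc'])) hmem']
      rw [if_neg hc]

-- inserting an element with a fresh count: a new singleton block appears where the count sorts
theorem ins_blocks_not_mem (K : List Int) (g : Int → List (String × Int)) (x : String × Int)
    (hK : K.Pairwise (fun a b => b < a)) (hg : ∀ c ∈ K, ∀ p ∈ g c, p.2 = c) (hnot : x.2 ∉ K) :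
    PySem.List.insertBy (fun a b => decide (b.2 < a.2)) x (K.flatMap g)
      = (PySem.List.insertBy (fun a b => decide (b < a)) x.2 K).flatMap
          (fun c => if c = x.2 then [x] else g c) := by
  induction K with
  | nil => simp [PySem.List.insertBy]
  | cons c K ih =>
    have hlt : ∀ b ∈ K, b < c := (List.pairwise_cons.mp hK).1
    have hKt : K.Pairwise (fun a b => b < a) := (List.pairwise_cons.mp hK).2
    have hne : c ≠ x.2 := fun h => hnot (by simp [h])
    have hnot' : x.2 ∉ K := fun h => hnot (by simp [h])
    by_cases hgt : c < x.2
    · -- x's count beats every block: it goes in front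
      rw [insertBy_front _ _ _ (fun y hy => by
        obtain ⟨c', hc', hy'⟩ := List.mem_flatMap.mp hy
        have h1 := hg c' hc' y hy'
        simp only [decide_eq_true_eq, h1]
        rcases List.mem_cons.mp hc' with h | h
        · omega
        · have := hlt c' h; omega)]
      rw [PySem.List.insertBy]
      simp only [decide_eq_true_eq, if_pos hgt]
      simp only [List.flatMap_cons, if_neg hne]
      have hcg : List.flatMap (fun c' => if c' = x.2 then [x] else g c') K
          = List.flatMap g K := by
        apply List.flatMap_congr
        intro c' hc'
        rw [if_neg (by intro h; exact hnot' (h ▸ hc'))]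
      rw [hcg]
      simp
    · have hxc : x.2 < c := by omega
      simp only [List.flatMap_cons]
      rw [insertBy_append_left _ _ _ _ (fun y hy => by
        have h1 := hg c (by simp) y hy
        simp only [decide_eq_false_iff_not, h1]
        omega)]
      rw [ih hKt (fun c' hc' => hg c' (by simp [hc'])) hnot']
      rw [PySem.List.insertBy]
      simp only [decide_eq_true_eq, if_neg (by omega : ¬ c < x.2)]
      simp only [List.flatMap_cons, if_neg hne]

-- the grouped form of a stable descending sort by count
def pvGrouped (items : List (String × Int)) : List (String × Int) :=
  (PySem.List.sorted (PySem.Set.ofList (items.map (·.2))) (fun c => c) true).flatMap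
    (fun c => items.filter (fun p => p.2 == c))

theorem sorted_counts_pairwise (l : List Int) :
    (PySem.List.sorted (PySem.Set.ofList l) (fun c => c) true).Pairwise (fun a b => b < a) := by
  have h1 := PySem.List.sorted_pairwise_rev (PySem.Set.ofList l) (fun c => c)
  have h2 : (PySem.List.sorted (PySem.Set.ofList l) (fun c => c) true).Nodup :=
    (PySem.List.sorted_perm (PySem.Set.ofList l) (fun c => c) true).symm.nodup
      (PySem.Set.nodup_ofList l)
  exact (h1.and h2).imp (fun h => by omega)

theorem ofList_append_singleton {α : Type} [BEq α] (l : List α) (v : α) :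
    PySem.Set.ofList (l ++ [v]) = PySem.Set.add (PySem.Set.ofList l) v := by
  rw [PySem.Set.ofList_eq_foldl, PySem.Set.ofList_eq_foldl, List.foldl_append]
  rfl

theorem set_add_of_mem {α : Type} [BEq α] [LawfulBEq α] (s : PySem.Set α) (v : α) (h : v ∈ s) :
    PySem.Set.add s v = s := by
  simp [PySem.Set.add, PySem.Set.contains, List.contains_eq_mem, h]

theorem set_add_of_not_mem {α : Type} [BEq α] [LawfulBEq α] (s : PySem.Set α) (v : α)
    (h : v ∉ s) : PySem.Set.add s v = s ++ [v] := by
  simp [PySem.Set.add, PySem.Set.contains, List.contains_eq_mem, h]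

-- stable sort by count descending = concatenation of per-count blocks, counts descending
theorem sorted_eq_grouped (items : List (String × Int)) :
    PySem.List.sorted items (fun p => p.2) true = pvGrouped items := by
  rw [PySem.List.sorted_rev_eq_foldl_insertBy]
  induction items using List.reverseRecOn with
  | nil => simp [pvGrouped, PySem.List.sorted]
  | append_singleton P x ih =>
    rw [List.foldl_append, List.foldl_cons, List.foldl_nil, ih]
    unfold pvGrouped
    have hK := sorted_counts_pairwise (P.map (·.2))
    have hg : ∀ c ∈ PySem.List.sorted (PySem.Set.ofList (P.map (·.2))) (fun c => c) true,
        ∀ p ∈ P.filter (fun p => p.2 == c), p.2 = c := by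
      intro c _ p hp
      simpa using (List.mem_filter.mp hp).2
    have hmapapp : (P ++ [x]).map (·.2) = P.map (·.2) ++ [x.2] := by simp
    by_cases hmem : x.2 ∈ PySem.Set.ofList (P.map (·.2))
    · have hmemK : x.2 ∈ PySem.List.sorted (PySem.Set.ofList (P.map (·.2))) (fun c => c) true :=
        (PySem.List.mem_sorted _ _ _ _).mpr hmem
      rw [ins_blocks_mem _ _ _ hK hg hmemK]
      have hset : PySem.Set.ofList ((P ++ [x]).map (·.2)) = PySem.Set.ofList (P.map (·.2)) := by
        rw [hmapapp, ofList_append_singleton, set_add_of_mem _ _ hmem]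
      rw [hset]
      apply List.flatMap_congr
      intro c _
      rw [List.filter_append]
      by_cases hc : c = x.2
      · rw [if_pos hc]
        simp only [List.filter_cons, List.filter_nil]
        rw [if_pos (by simp [hc])]
      · rw [if_neg hc]
        simp only [List.filter_cons, List.filter_nil]
        rw [if_neg (by simpa using fun h => hc h.symm)]
        simp
    · have hnotK : x.2 ∉ PySem.List.sorted (PySem.Set.ofList (P.map (·.2))) (fun c => c) true :=
        fun h => hmem ((PySem.List.mem_sorted _ _ _ _).mp h)
      rw [ins_blocks_not_mem _ _ _ hK hg hnotK]
      have hset : PySem.Set.ofList ((P ++ [x]).map (·.2))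
          = PySem.Set.ofList (P.map (·.2)) ++ [x.2] := by
        rw [hmapapp, ofList_append_singleton, set_add_of_not_mem _ _ hmem]
      have hKnew : PySem.List.sorted (PySem.Set.ofList ((P ++ [x]).map (·.2))) (fun c => c) true
          = PySem.List.insertBy (fun a b => decide (b < a)) x.2
              (PySem.List.sorted (PySem.Set.ofList (P.map (·.2))) (fun c => c) true) := by
        rw [hset, PySem.List.sorted_rev_eq_foldl_insertBy, List.foldl_append,
          List.foldl_cons, List.foldl_nil, ← PySem.List.sorted_rev_eq_foldl_insertBy]
      rw [hKnew]
      apply List.flatMap_congr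
      intro c hc
      have hcmem := (PySem.List.mem_insertBy _ _ _ _).mp hc
      rw [List.filter_append]
      by_cases hcx : c = x.2
      · rw [if_pos hcx]
        simp only [List.filter_cons, List.filter_nil]
        rw [if_pos (by simp [hcx])]
        have hfe : P.filter (fun p => p.2 == c) = [] := by
          rw [List.filter_eq_nil_iff]
          intro p hp hpc
          apply hmem
          rw [PySem.Set.mem_ofList]
          exact List.mem_map.mpr ⟨p, hp, by have := (beq_iff_eq).mp hpc; simp [this, hcx]⟩
        rw [hfe]
        simp
      · rw [if_neg hcx]
        simp only [List.filter_cons, List.filter_nil]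
        rw [if_neg (by simpa using fun h => hcx h.symm)]
        simp

-- the bucket dict, characterised (stated in the insert/getD form Dict.modify unfolds to)
theorem buckets_getD (items : List (String × Int)) (c : Int) :
    (items.foldl (fun b p => b.insert p.2 (b.getD p.2 [] ++ [p.1]))
        (PySem.Dict.empty : PySem.Dict Int (List String))).getD c []
      = (items.filter (fun p => p.2 == c)).map (·.1) := by
  have h : (items.map (fun p => (p.2, p.1))).foldl
        (fun b q => b.modify q.1 [] (· ++ [q.2]))
        (PySem.Dict.empty : PySem.Dict Int (List String))
      = items.foldl (fun b p => b.insert p.2 (b.getD p.2 [] ++ [p.1])) PySem.Dict.empty := by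
    rw [List.foldl_map]
    simp [PySem.Dict.modify]
  rw [← h, PySem.Dict.getD_foldl_modify_append, List.filter_map]
  simp [Function.comp_def]

theorem buckets_keys (items : List (String × Int)) :
    (items.foldl (fun b p => b.insert p.2 (b.getD p.2 [] ++ [p.1]))
        (PySem.Dict.empty : PySem.Dict Int (List String))).keys
      = PySem.Set.ofList (items.map (·.2)) := by
  have h : items.foldl (fun b p => b.insert p.2 (b.getD p.2 [] ++ [p.1]))
        (PySem.Dict.empty : PySem.Dict Int (List String))
      = items.foldl (fun b p => b.modify p.2 [] (· ++ [p.1])) PySem.Dict.empty := by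
    simp [PySem.Dict.modify]
  rw [h,
    PySem.Dict.keys_foldl_modify_key items (fun p => p.2) [] (fun _ p => (· ++ [p.1])),
    PySem.Dict.keys_empty, PySem.Set.ofList_eq_foldl]
  rfl

-- the emission loop with early stop agrees, up to take n, with the full concatenation
theorem emit_take (buckets : PySem.Dict Int (List String)) (n : Int) (cs : List Int)
    (acc : List String) :
    (pvEmit buckets n cs acc).take n.toNat
      = (acc ++ cs.flatMap (fun c => buckets.getD c [])).take n.toNat := by
  induction cs generalizing acc with
  | nil => simp [pvEmit]
  | cons c cs ih =>
    rw [pvEmit]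
    by_cases h : n ≤ (acc.length : Int)
    · rw [if_pos h]
      rw [List.take_append_of_le_length (by exact_mod_cast Int.toNat_le.mpr h)]
    · rw [if_neg h, ih]
      simp [List.flatMap_cons]

-- the emission loop returns [] when n ≤ 0
theorem emit_nonpos (buckets : PySem.Dict Int (List String)) (n : Int) (cs : List Int)
    (hn : n ≤ 0) : pvEmit buckets n cs [] = [] := by
  cases cs with
  | nil => rfl
  | cons c cs => rw [pvEmit, if_pos (by simpa using hn)]

-- ===== VERDICT (by name: the statement is the Claim_ definition above) =====
theorem top_n_combined_spec : Claim_equal_top_n_combined := by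
  intro br n ex _
  unfold Spec_top_n_combined top_n_combined top_n_combined_alt
  simp only [PySem.Dict.modify]
  by_cases hn : n ≤ 0
  · -- n ≤ 0: both sides return []
    rw [emit_nonpos _ _ _ hn]
    have h1 : n.toNat = 0 := by omega
    rw [h1]
    simp [PySem.List.slice]
  · have hn' : 0 ≤ n := by omega
    rw [PySem.List.slice_to _ hn']
    rw [emit_take, List.nil_append]
    rw [buckets_keys, sorted_eq_grouped]
    unfold pvGrouped
    rw [List.map_take, List.map_flatMap]
    congr 1
    apply List.flatMap_congr
    intro c _
    rw [buckets_getD]
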